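-- pv_equiv track=rewrite | github.com/josephcappadona/text-image-generation | src/utils.py | break_token_into_lines
-- ===== SOURCE A (Python) =====
-- def break_token_into_lines(token, chars_per_line):
--     space_chars = set(' \n\t')
--
--     new_token = ''
--     hold = False
--     for i, c in enumerate(token):
--         if (i+1) % chars_per_line == 0 or hold:
--             if c == ' ' or c == '\n':
--                 new_token += '\n'
--                 hold = False
--             else:
--                 new_token += c
--                 hold = True
--         else:
--             new_token += c
--
--     return new_token
-- ===== SOURCE B (Python) =====
-- def break_token_into_lines(token, chars_per_line):
--     # Jump from line boundary to line boundary, replacing the first space/newline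
--     # found at or after each boundary, instead of scanning every character.
--     buf = list(token)
--     n = len(buf)
--     i = chars_per_line - 1
--     while i < n:
--         j = i
--         while j < n and buf[j] != ' ' and buf[j] != '\n':
--             j += 1
--         if j == n:
--             break
--         buf[j] = '\n'
--         i = (j // chars_per_line + 1) * chars_per_line - 1
--         if i <= j:
--             i += chars_per_line
--     return ''.join(buf)
-- ===== Notes on version B (the rewrite author's own statement) =====
-- stated objective: faster
-- what changed: Replaces A's per-character pass (a modulo test, branch and string += for every character) by a boundary-jumping loop over a list buffer: jump to each break boundary, seek forward to the next ' '/'\n', overwrite it in place, and compute the next boundary with one division; Pre_ restricts to positive chars_per_line, the natural domain of a line width (A raises ZeroDivisionError at 0 on nonempty input, and its breaking at |cpl| for negative widths is an accident of Python's modulo sign).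
-- outside the precondition, e.g. on break_token_into_lines('ab cd ef', -3): A returns 'ab\ncd\nef', B raises IndexError; on break_token_into_lines('ab', 0): A raises ZeroDivisionError, B returns 'ab'; on break_token_into_lines('', 0): A returns '', B raises IndexError
import Mathlib
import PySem

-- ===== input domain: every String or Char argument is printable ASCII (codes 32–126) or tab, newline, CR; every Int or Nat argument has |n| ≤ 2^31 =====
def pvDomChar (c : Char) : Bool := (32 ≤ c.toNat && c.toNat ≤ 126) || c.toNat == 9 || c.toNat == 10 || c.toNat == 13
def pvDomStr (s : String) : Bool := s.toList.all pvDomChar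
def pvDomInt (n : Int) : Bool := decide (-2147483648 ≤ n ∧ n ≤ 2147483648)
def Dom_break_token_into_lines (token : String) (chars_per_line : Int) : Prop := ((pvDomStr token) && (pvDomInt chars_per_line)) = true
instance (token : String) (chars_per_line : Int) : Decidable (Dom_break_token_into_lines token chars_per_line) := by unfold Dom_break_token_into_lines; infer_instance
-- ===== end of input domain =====

-- B replaces A's per-character modulo-and-hold pass by a boundary-jumping loop that seeks
-- the next ' '/'\n' forward from each break boundary and edits a list buffer in place
-- (objective: faster by a constant factor).

-- ===== PORT A =====
-- the body of A's for loop, folded over enumerate(token)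
def breakA_step (chars_per_line : Int) (acc : List Char × Bool) (p : Int × Char) : List Char × Bool :=
  let new_token := acc.1
  let hold := acc.2
  let i := p.1
  let c := p.2
  if PySem.Int.mod (i + 1) chars_per_line == 0 || hold then
    if c == ' ' || c == '\n' then (new_token ++ ['\n'], false)
    else (new_token ++ [c], true)
  else (new_token ++ [c], hold)

def break_token_into_lines (token : String) (chars_per_line : Int) : String :=
  let _space_chars := PySem.Set.ofList [' ', '\n', '\t']   -- computed and never used by A
  String.mk ((PySem.List.enumerate token.toList 0).foldl (breakA_step chars_per_line) ([], false)).1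

-- ===== PORT B =====
-- inner while of Source B: first index ≥ j whose char is ' ' or '\n' (buf.length if none)
def pvFindWs (buf : List Char) (j : Nat) : Nat :=
  if h : j < buf.length then
    if buf[j] ≠ ' ' ∧ buf[j] ≠ '\n' then pvFindWs buf (j + 1) else j
  else j
termination_by buf.length - j

-- outer while of Source B (fuel only makes the loop total; buf.length + 1 always suffices)
def pvGoB : Nat → List Char → Int → Int → List Char
  | 0, buf, _, _ => buf
  | fuel + 1, buf, i, m =>
    if i < (buf.length : Int) then
      let j := pvFindWs buf i.toNat
      if j = buf.length then buf
      else
        let i' := (PySem.Int.floordiv (j : Int) m + 1) * m - 1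
        pvGoB fuel (buf.set j '\n') (if i' ≤ (j : Int) then i' + m else i') m
    else buf

def break_token_into_lines_alt (token : String) (chars_per_line : Int) : String :=
  let buf := token.toList
  String.mk (pvGoB (buf.length + 1) buf (chars_per_line - 1) chars_per_line)

-- ===== PRECONDITION & SPEC =====
-- Pre_ restricts to positive chars_per_line, the natural domain of a line width: A raises
-- ZeroDivisionError at 0 on nonempty input (and returns '' only on the empty token), and its
-- breaking at multiples of |cpl| for negative widths is an accident of Python's modulo sign.
def Pre_break_token_into_lines (token : String) (chars_per_line : Int) : Prop := 0 < chars_per_line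
instance (token : String) (chars_per_line : Int) : Decidable (Pre_break_token_into_lines token chars_per_line) := by unfold Pre_break_token_into_lines; infer_instance

def pvWitness_break_token_into_lines : String × Int := ("hello world tokens", 5)

def Spec_break_token_into_lines (token : String) (chars_per_line : Int) (out : String) : Prop := out = break_token_into_lines_alt token chars_per_line
instance (token : String) (chars_per_line : Int) (out : String) : Decidable (Spec_break_token_into_lines token chars_per_line out) := by unfold Spec_break_token_into_lines; infer_instance

-- ===== CLAIM (what is proved, stated in full; the proofs are below) =====
def Claim_equal_break_token_into_lines : Prop := ∀ (token : String) (chars_per_line : Int), Dom_break_token_into_lines token chars_per_line → Pre_break_token_into_lines token chars_per_line → Spec_break_token_into_lines token chars_per_line (break_token_into_lines token chars_per_line)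


-- ===== LEMMAS AND PROOFS =====

-- A's loop, rewritten as structural recursion over the remaining characters:
-- p is the absolute 0-based position, m = chars_per_line as a Nat.
def recA (m : Nat) : List Char → Nat → Bool → List Char
  | [], _, _ => []
  | c :: cs, p, hold =>
    if ((p + 1) % m == 0 || hold : Bool) then
      if (c == ' ' || c == '\n' : Bool) then '\n' :: recA m cs (p + 1) false
      else c :: recA m cs (p + 1) true
    else c :: recA m cs (p + 1) hold

lemma condA_bridge (cpl : Int) (h : cpl ≠ 0) (p : Nat) :
    (PySem.Int.mod ((p : Int) + 1) cpl == 0) = ((p + 1) % cpl.natAbs == 0) := by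
  have hm : 0 < cpl.natAbs := Int.natAbs_pos.mpr h
  rw [Bool.eq_iff_iff]
  simp only [beq_iff_eq]
  have hcast : ((p : Int) + 1) = ((p + 1 : Nat) : Int) := by push_cast; ring
  rw [hcast, PySem.Int.mod_eq_zero_iff_dvd, ← Int.natAbs_dvd, Int.natCast_dvd_natCast]
  exact Nat.dvd_iff_mod_eq_zero

lemma bridgeA (cpl : Int) (h : cpl ≠ 0) :
    ∀ (cs : List Char) (p : Nat) (acc : List Char) (hold : Bool),
      ((PySem.List.enumerate cs (p : Int)).foldl (breakA_step cpl) (acc, hold)).1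
        = acc ++ recA cpl.natAbs cs p hold := by
  intro cs
  induction cs with
  | nil => intro p acc hold; simp [PySem.List.enumerate_nil, recA]
  | cons c cs ih =>
    intro p acc hold
    rw [PySem.List.enumerate_cons, List.foldl_cons]
    have hcast : (p : Int) + 1 = ((p + 1 : Nat) : Int) := by push_cast; ring
    have hstep : breakA_step cpl (acc, hold) ((p : Int), c) =
        if (((p + 1) % cpl.natAbs == 0) || hold : Bool) then
          (if (c == ' ' || c == '\n' : Bool) then (acc ++ ['\n'], false) else (acc ++ [c], true))
        else (acc ++ [c], hold) := by
      simp only [breakA_step, condA_bridge cpl h p]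
    rw [hstep, hcast]
    rcases hb : (((p + 1) % cpl.natAbs == 0) || hold : Bool) with _ | _ <;>
      rcases hws : (c == ' ' || c == '\n' : Bool) with _ | _ <;>
      simp only [Bool.false_eq_true, ↓reduceIte, ih, recA, hb, hws] <;>
      simp [List.append_assoc]

-- residues m-1 mod m are m apart
lemma resid_unique {m a b : Nat} (hm : 1 ≤ m) (hab : a % m = b % m) (h1 : a < b) (h2 : b < a + m) : False := by
  have hd : m ∣ b - a := (Nat.modEq_iff_dvd' (le_of_lt h1)).mp hab
  have := Nat.le_of_dvd (by omega) hd
  omega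

lemma succ_mod_eq_zero {m x : Nat} (hm : 1 ≤ m) : ((x + 1) % m == 0) = (x % m == m - 1) := by
  rcases Nat.lt_or_ge 1 m with h2 | h2
  · have hr : x % m < m := Nat.mod_lt _ (by omega)
    rw [Bool.eq_iff_iff]
    simp only [beq_iff_eq]
    rw [Nat.add_mod x 1 m, Nat.mod_eq_of_lt (show 1 < m by omega)]
    by_cases hc : x % m = m - 1
    · rw [hc, show m - 1 + 1 = m by omega, Nat.mod_self]
      simp
    · rw [Nat.mod_eq_of_lt (by omega : x % m + 1 < m)]
      constructor <;> intro h3 <;> omega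
  · have : m = 1 := by omega
    subst this
    simp [Nat.mod_one]

-- A copies characters unchanged (hold = false) across positions that are not boundaries
lemma copyA (m : Nat) : ∀ (d : Nat) (cs : List Char) (p : Nat),
    (∀ e, e < d → ((p + 1 + e) % m == 0) = false) →
    recA m cs p false = cs.take d ++ recA m (cs.drop d) (p + d) false := by
  intro d
  induction d with
  | zero => intro cs p _; simp
  | succ d ih =>
    intro cs p hno
    cases cs with
    | nil => simp [recA]
    | cons c cs =>
      have h0 : ((p + 1) % m == 0) = false := by
        have := hno 0 (by omega); simpa using this
      rw [recA, h0]
      simp only [Bool.or_self, Bool.false_eq_true, ↓reduceIte]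
      rw [ih cs (p + 1) (fun e he => by
        have := hno (e + 1) (by omega)
        simpa [Nat.add_assoc, Nat.add_comm, Nat.add_left_comm] using this)]
      rw [show p + (d + 1) = p + 1 + d from by omega]
      simp [List.take_succ_cons, List.drop_succ_cons]

-- at a boundary, hold = false behaves like hold = true
lemma boundaryA (m : Nat) (cs : List Char) (p : Nat) (hb : ((p + 1) % m == 0) = true) :
    recA m cs p false = recA m cs p true := by
  cases cs with
  | nil => simp [recA]
  | cons c cs => simp [recA, hb]

-- hold mode with no whitespace left: everything is copied
lemma holdA_none (m : Nat) : ∀ (cs : List Char) (p : Nat),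
    (∀ (t : Nat) c, cs[t]? = some c → (c == ' ' || c == '\n') = false) →
    recA m cs p true = cs := by
  intro cs
  induction cs with
  | nil => intro p _; simp [recA]
  | cons c cs ih =>
    intro p hno
    have h0 : (c == ' ' || c == '\n') = false := hno 0 c (by simp)
    rw [recA]
    simp only [Bool.or_true, h0, Bool.false_eq_true, ↓reduceIte]
    rw [ih (p + 1) (fun t ch hch => hno (t + 1) ch (by simpa using hch))]

-- hold mode: first whitespace at relative index k becomes '\n', then hold clears
lemma holdA_find (m : Nat) : ∀ (k : Nat) (cs : List Char) (p : Nat),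
    k < cs.length →
    (∀ (t : Nat) c, t < k → cs[t]? = some c → (c == ' ' || c == '\n') = false) →
    (∀ c, cs[k]? = some c → (c == ' ' || c == '\n') = true) →
    recA m cs p true = cs.take k ++ '\n' :: recA m (cs.drop (k + 1)) (p + k + 1) false := by
  intro k
  induction k with
  | zero =>
    intro cs p hk _ hhit
    cases cs with
    | nil => simp at hk
    | cons c cs =>
      have hws : (c == ' ' || c == '\n') = true := hhit c (by simp)
      rw [recA]
      simp [hws]
  | succ k ih =>
    intro cs p hk hbef hhit
    cases cs with
    | nil => simp at hk
    | cons c cs =>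
      have h0 : (c == ' ' || c == '\n') = false := hbef 0 c (by omega) (by simp)
      rw [recA]
      simp only [Bool.or_true, h0, Bool.false_eq_true, ↓reduceIte]
      rw [ih cs (p + 1) (by simpa using hk)
        (fun t ch ht hch => hbef (t + 1) ch (by omega) (by simpa using hch))
        (fun ch hch => hhit ch (by simpa using hch))]
      rw [show p + (k + 1) + 1 = p + 1 + k + 1 from by omega]
      simp [List.take_succ_cons, List.drop_succ_cons]

-- pvFindWs facts
lemma findWs_ge (buf : List Char) (j : Nat) : j ≤ pvFindWs buf j := by
  fun_induction pvFindWs buf j with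
  | case1 j h hne ih => omega
  | case2 j h hne => omega
  | case3 j h => omega

lemma findWs_le (buf : List Char) (j : Nat) : pvFindWs buf j ≤ max j buf.length := by
  fun_induction pvFindWs buf j with
  | case1 j h hne ih => omega
  | case2 j h hne => omega
  | case3 j h => omega

lemma findWs_before (buf : List Char) (j : Nat) : ∀ (t : Nat), t < pvFindWs buf j → j ≤ t →
    ∀ c, buf[t]? = some c → (c == ' ' || c == '\n') = false := by
  fun_induction pvFindWs buf j with
  | case1 j h hne ih =>
    intro t ht hjt c hc
    rcases Nat.eq_or_lt_of_le hjt with heq | hlt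
    · subst heq
      rw [List.getElem?_eq_getElem h] at hc
      obtain ⟨h1, h2⟩ := hne
      simp only [Option.some.injEq] at hc
      subst hc
      simp [h1, h2]
    · exact ih t ht hlt c hc
  | case2 j h hne => intro t ht hjt; omega
  | case3 j h => intro t ht hjt; omega

lemma findWs_hit (buf : List Char) (j : Nat) :
    pvFindWs buf j < buf.length →
    ∀ c, buf[pvFindWs buf j]? = some c → (c == ' ' || c == '\n') = true := by
  fun_induction pvFindWs buf j with
  | case1 j h hne ih => exact ih
  | case2 j h hne =>
    intro _ c hc
    rw [List.getElem?_eq_getElem h] at hc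
    simp only [Option.some.injEq] at hc
    subst hc
    rcases not_and_or.mp hne with h1 | h1 <;> simp [not_not.mp h1]
  | case3 j h => intro h2; omega

-- the next boundary computed by B lands strictly after j, within m, with residue m-1
lemma pred_mul_mod (m a : Nat) (hm : 1 ≤ m) (ha : 1 ≤ a) : (a * m - 1) % m = m - 1 := by
  obtain ⟨b, rfl⟩ := Nat.exists_eq_add_of_le ha
  have h1 : (1 + b) * m = m + m * b := by ring
  rw [show (1 + b) * m - 1 = m * b + (m - 1) from by omega, Nat.mul_add_mod]
  exact Nat.mod_eq_of_lt (by omega)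

lemma nextBoundary (m j : Nat) (hm : 1 ≤ m) :
    ∃ k : Nat,
      (if ((PySem.Int.floordiv (j : Int) (m : Int) + 1) * (m : Int) - 1) ≤ (j : Int)
        then ((PySem.Int.floordiv (j : Int) (m : Int) + 1) * (m : Int) - 1) + (m : Int)
        else ((PySem.Int.floordiv (j : Int) (m : Int) + 1) * (m : Int) - 1)) = (k : Int)
      ∧ j < k ∧ k ≤ j + m ∧ k % m = m - 1 := by
  have hdm := Nat.div_add_mod j m
  have hrm : j % m < m := Nat.mod_lt _ hm
  have hfd : PySem.Int.floordiv (j : Int) (m : Int) = ((j / m : Nat) : Int) :=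
    PySem.Int.floordiv_natCast j m
  rw [hfd]
  set d := j / m with hd
  clear_value d
  have hmul : (d + 1) * m = m * d + m := by ring
  have h1 : ((d : Int) + 1) * (m : Int) - 1 = (((d + 1) * m - 1 : Nat) : Int) := by
    have h2 : 1 ≤ (d + 1) * m := by omega
    push_cast [h2]
    ring
  by_cases hc : ((d : Int) + 1) * (m : Int) - 1 ≤ (j : Int)
  · have hcN : (d + 1) * m - 1 ≤ j := by
      rw [h1] at hc; exact_mod_cast hc
    refine ⟨(d + 1) * m - 1 + m, ?_, by omega, by omega, ?_⟩
    · rw [if_pos hc, h1]; push_cast; ring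
    · rw [Nat.add_mod_right]
      exact pred_mul_mod m (d + 1) hm (by omega)
  · have hcN : j < (d + 1) * m - 1 := by
      rw [h1] at hc
      have h3 : (j : Int) < (((d + 1) * m - 1 : Nat) : Int) := by omega
      exact_mod_cast h3
    exact ⟨(d + 1) * m - 1, by rw [if_neg hc, h1], by omega, by omega,
      pred_mul_mod m (d + 1) hm (by omega)⟩

-- no break boundary strictly between two residue-(m-1) positions less than m apart
lemma noB (m iN : Nat) (hm : 1 ≤ m) (hres : iN % m = m - 1) (x : Nat)
    (h1 : x < iN) (h2 : iN < x + m) : ((x + 1) % m == 0) = false := by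
  rw [succ_mod_eq_zero hm]
  simp only [beq_eq_false_iff_ne, ne_eq]
  intro hx
  exact resid_unique hm (hx.trans hres.symm) h1 h2

-- A copies the whole suffix when the next boundary iN lies at or beyond its end
lemma tailA (m : Nat) (suf : List Char) (q iN : Nat) (hm : 1 ≤ m)
    (hres : iN % m = m - 1) (hge : q + suf.length ≤ iN) (hlt : iN < q + m) :
    recA m suf q false = suf := by
  rw [copyA m suf.length suf q (fun e he => by
      rw [show q + 1 + e = (q + e) + 1 from by omega]
      exact noB m iN hm hres _ (by omega) (by omega))]
  simp [List.take_length, List.drop_length, recA]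

-- MAIN invariant: B's outer loop, started at boundary iN with the prefix pre already final,
-- produces pre ++ (A's processing of the remaining suffix from position pre.length, hold = false)
lemma mainInv : ∀ (fuel : Nat) (m : Nat) (pre suf : List Char) (iN : Nat),
    1 ≤ m → iN % m = m - 1 → pre.length ≤ iN → iN < pre.length + m →
    pre.length + suf.length ≤ fuel + iN →
    pvGoB fuel (pre ++ suf) (iN : Int) (m : Int) = pre ++ recA m suf pre.length false := by
  intro fuel
  induction fuel with
  | zero =>
    intro m pre suf iN hm hres hq hlt hfuel
    rw [pvGoB, tailA m suf pre.length iN hm hres (by omega) hlt]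
  | succ fuel ih =>
    intro m pre suf iN hm hres hq hlt hfuel
    rw [pvGoB]
    by_cases hin : iN < pre.length + suf.length
    · rw [if_pos (by rw [List.length_append]; exact_mod_cast hin :
          (iN : Int) < ((pre ++ suf).length : Int))]
      simp only [Int.toNat_natCast]
      set j := pvFindWs (pre ++ suf) iN with hjdef
      clear_value j
      have hjge : iN ≤ j := by rw [hjdef]; exact findWs_ge _ _
      have hjle : j ≤ pre.length + suf.length := by
        have := findWs_le (pre ++ suf) iN
        rw [List.length_append] at this
        omega
      by_cases hj : j = (pre ++ suf).length
      · rw [if_pos hj]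
        rw [copyA m (iN - pre.length) suf pre.length (fun e he => by
            rw [show pre.length + 1 + e = (pre.length + e) + 1 from by omega]
            exact noB m iN hm hres _ (by omega) (by omega))]
        rw [show pre.length + (iN - pre.length) = iN from by omega]
        rw [boundaryA m _ iN (by rw [succ_mod_eq_zero hm]; simp [hres])]
        rw [holdA_none m _ iN (fun t c hc => by
            rw [List.getElem?_drop] at hc
            have hlen2 : iN - pre.length + t < suf.length := by
              by_contra hge2
              rw [List.getElem?_eq_none_iff.mpr (by omega)] at hc
              cases hc
            have hcc : (pre ++ suf)[iN + t]? = some c := by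
              rw [List.getElem?_append_right (by omega : pre.length ≤ iN + t),
                show iN + t - pre.length = iN - pre.length + t from by omega]
              exact hc
            exact findWs_before (pre ++ suf) iN (iN + t)
              (by rw [← hjdef, hj, List.length_append]; omega) (by omega) c hcc)]
        rw [List.take_append_drop]
      · rw [if_neg hj]
        rw [List.length_append] at hj
        have hjlt : j < pre.length + suf.length := by omega
        obtain ⟨k, hkeq, hk1, hk2, hk3⟩ := nextBoundary m j hm
        rw [hkeq]
        set jr := j - pre.length with hjr
        clear_value jr
        have hjr2 : jr < suf.length := by omega
        -- the written buffer, split as a longer final prefix and the rest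
        have hset : (pre ++ suf).set j '\n' =
            (pre ++ (suf.take jr ++ ['\n'])) ++ suf.drop (jr + 1) := by
          rw [List.set_append_right j '\n' (by omega), ← hjr,
            List.set_eq_take_cons_drop '\n' hjr2]
          simp [List.append_assoc]
        -- A's view of the same step
        have hA : recA m suf pre.length false =
            suf.take jr ++ '\n' :: recA m (suf.drop (jr + 1)) (j + 1) false := by
          rw [copyA m (iN - pre.length) suf pre.length (fun e he => by
              rw [show pre.length + 1 + e = (pre.length + e) + 1 from by omega]
              exact noB m iN hm hres _ (by omega) (by omega))]
          rw [show pre.length + (iN - pre.length) = iN from by omega]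
          rw [boundaryA m _ iN (by rw [succ_mod_eq_zero hm]; simp [hres])]
          rw [holdA_find m (j - iN) (suf.drop (iN - pre.length)) iN
            (by rw [List.length_drop]; omega)
            (fun t c ht hc => by
              rw [List.getElem?_drop] at hc
              have hcc : (pre ++ suf)[iN + t]? = some c := by
                rw [List.getElem?_append_right (by omega : pre.length ≤ iN + t),
                  show iN + t - pre.length = iN - pre.length + t from by omega]
                exact hc
              exact findWs_before (pre ++ suf) iN (iN + t) (by omega) (by omega) c hcc)
            (fun c hc => by
              rw [List.getElem?_drop,
                show iN - pre.length + (j - iN) = jr from by omega] at hc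
              have hcc : (pre ++ suf)[j]? = some c := by
                rw [List.getElem?_append_right (by omega : pre.length ≤ j),
                  ← hjr]
                exact hc
              exact findWs_hit (pre ++ suf) iN (by rw [← hjdef, List.length_append]; omega) c
                (by rw [← hjdef]; exact hcc))]
          rw [List.drop_drop, show iN - pre.length + (j - iN + 1) = jr + 1 from by omega]
          rw [show iN + (j - iN) + 1 = j + 1 from by omega]
          rw [← List.append_assoc, ← List.take_add,
            show iN - pre.length + (j - iN) = jr from by omega]
      -- hand the new state to the induction hypothesis
        rw [hset, ih m (pre ++ (suf.take jr ++ ['\n'])) (suf.drop (jr + 1)) k hm hk3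
          (by simp [List.length_append, List.length_take]; omega)
          (by simp [List.length_append, List.length_take]; omega)
          (by simp [List.length_append, List.length_take, List.length_drop]; omega)]
        rw [show (pre ++ (suf.take jr ++ ['\n'])).length = j + 1 from by
          simp [List.length_append, List.length_take]; omega]
        rw [hA]
        simp [List.append_assoc]
    · rw [if_neg (by rw [List.length_append]; push_cast; omega)]
      rw [tailA m suf pre.length iN hm hres (by omega) hlt]

-- ===== VERDICT (by name: the statement is the Claim_ definition above) =====
theorem break_token_into_lines_spec : Claim_equal_break_token_into_lines := by
  unfold Claim_equal_break_token_into_lines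
  intro token cpl _ hpre
  unfold Pre_break_token_into_lines at hpre
  obtain ⟨m, rfl⟩ : ∃ m : Nat, cpl = (m : Int) := ⟨cpl.toNat, (Int.toNat_of_nonneg hpre.le).symm⟩
  have hm : 1 ≤ m := by exact_mod_cast hpre
  unfold Spec_break_token_into_lines break_token_into_lines break_token_into_lines_alt
  dsimp only
  have hb := bridgeA (m : Int) (by exact_mod_cast hpre.ne') token.toList 0 [] false
  rw [Nat.cast_zero] at hb
  rw [hb, List.nil_append, Int.natAbs_natCast] at *
  have hmain := mainInv (token.toList.length + 1) m [] token.toList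
      (m - 1) hm (Nat.mod_eq_of_lt (by omega)) (by simp)
      (by simp; omega) (by simp; omega)
  simp only [List.nil_append, List.length_nil] at hmain
  have hcast : (m : Int) - 1 = ((m - 1 : Nat) : Int) := by omega
  rw [hcast, hmain]
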